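-- pv_equiv track=rewrite | github.com/PrithvirajProf/Nasdaq-Data-Cleaning | onecode1.py | indexChecker
-- ===== SOURCE A (Python) =====
-- def indexChecker(in1,in2,sortedProps):
--     """
--     This function is made to do natural sorting of the elements,
--     as many of the Nasdaq files lack formatting when it comes to indexing the proposals
--     """
--     index1 = 0
--     index2 = 0
--     if in1 and in2 in sortedProps:
--         for i in range(len(sortedProps)):
--             if sortedProps[i] == in1:
--                 index1 = i
--             elif sortedProps[i]==in2:
--                 index2 = i
--         if index1 == 0 or index2 ==0:
--             return False
--         elif index1>index2:
--             return True
--         else: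
--             return False
-- ===== SOURCE B (Python) =====
-- def indexChecker(in1, in2, sortedProps):
--     if in1 and in2 in sortedProps:
--         index1 = 0
--         for i in range(len(sortedProps) - 1, -1, -1):
--             if sortedProps[i] == in1:
--                 index1 = i
--                 break
--         index2 = 0
--         for i in range(len(sortedProps) - 1, -1, -1):
--             if sortedProps[i] == in2:
--                 index2 = i
--                 break
--         if index1 == 0 or index2 == 0:
--             return False
--         elif index1 > index2:
--             return True
--         else:
--             return False
-- ===== Notes on version B (the rewrite author's own statement) =====
-- stated objective: alternative
-- what changed: A's single forward pass that tracks last-match indices for both elements via an if/elif state is replaced by two independent early-terminating backward scans, one per element, followed by the same comparison.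
import Mathlib
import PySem

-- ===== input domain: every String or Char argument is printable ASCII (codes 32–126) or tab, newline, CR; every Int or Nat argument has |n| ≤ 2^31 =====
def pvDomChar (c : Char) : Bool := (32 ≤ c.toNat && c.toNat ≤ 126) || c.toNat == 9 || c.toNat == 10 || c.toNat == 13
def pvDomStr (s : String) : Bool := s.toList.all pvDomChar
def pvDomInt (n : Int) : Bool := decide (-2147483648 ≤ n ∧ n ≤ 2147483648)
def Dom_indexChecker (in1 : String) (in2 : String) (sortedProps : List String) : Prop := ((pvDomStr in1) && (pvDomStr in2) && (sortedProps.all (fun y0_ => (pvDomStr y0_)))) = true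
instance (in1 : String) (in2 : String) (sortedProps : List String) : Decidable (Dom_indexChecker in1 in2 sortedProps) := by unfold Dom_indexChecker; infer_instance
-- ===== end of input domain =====

-- B replaces A's single forward pass tracking two last-match indices by two independent
-- early-terminating backward scans; same return value everywhere (alternative decomposition).

-- ===== PORT A =====
-- A's forward loop: for i in range(len(sortedProps)), keeping the LAST index matching in1
-- (and, in the elif branch, the last index matching in2) in the pair state.
def loopA (in1 in2 : String) : List String → Int → Int × Int → Int × Int
  | [], _, st => st
  | x :: xs, i, st =>
      if x = in1 then loopA in1 in2 xs (i + 1) (i, st.2)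
      else if x = in2 then loopA in1 in2 xs (i + 1) (st.1, i)
      else loopA in1 in2 xs (i + 1) st

def indexChecker (in1 : String) (in2 : String) (sortedProps : List String) : Option Bool :=
  -- Python guard `if in1 and in2 in sortedProps`: in1 truthy (nonempty) and in2 ∈ list
  if in1 ≠ "" ∧ in2 ∈ sortedProps then
    let st := loopA in1 in2 sortedProps 0 (0, 0)
    if st.1 = 0 ∨ st.2 = 0 then some false
    else if st.1 > st.2 then some true
    else some false
  else none  -- Python falls off the function: implicit None

-- ===== PORT B =====
-- B's backward scan `for i in range(len-1, -1, -1): if xs[i] == t: break`, default 0: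
-- walk the reversed list carrying the current index downward.
def revGo (t : String) : List String → Int → Int
  | [], _ => 0
  | x :: xs, i => if x = t then i else revGo t xs (i - 1)

def indexChecker_alt (in1 : String) (in2 : String) (sortedProps : List String) : Option Bool :=
  if in1 ≠ "" ∧ in2 ∈ sortedProps then
    let index1 := revGo in1 sortedProps.reverse ((sortedProps.length : Int) - 1)
    let index2 := revGo in2 sortedProps.reverse ((sortedProps.length : Int) - 1)
    if index1 = 0 ∨ index2 = 0 then some false
    else if index1 > index2 then some true
    else some false
  else none

-- ===== PRECONDITION & SPEC =====
def Spec_indexChecker (in1 : String) (in2 : String) (sortedProps : List String) (out : Option Bool) : Prop := out = indexChecker_alt in1 in2 sortedProps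
instance (in1 : String) (in2 : String) (sortedProps : List String) (out : Option Bool) : Decidable (Spec_indexChecker in1 in2 sortedProps out) := by unfold Spec_indexChecker; infer_instance

-- ===== CLAIM (what is proved, stated in full; the proofs are below) =====
def Claim_equal_indexChecker : Prop := ∀ (in1 : String) (in2 : String) (sortedProps : List String), Dom_indexChecker in1 in2 sortedProps → Spec_indexChecker in1 in2 sortedProps (indexChecker in1 in2 sortedProps)

-- ===== LEMMAS AND PROOFS =====

theorem loopA_append (in1 in2 : String) (xs ys : List String) (i : Int) (st : Int × Int) :
    loopA in1 in2 (xs ++ ys) i st = loopA in1 in2 ys (i + xs.length) (loopA in1 in2 xs i st) := by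
  induction xs generalizing i st with
  | nil => simp [loopA]
  | cons x xs ih =>
      simp only [List.cons_append, loopA, List.length_cons]
      split_ifs <;> rw [ih] <;> congr 1 <;> push_cast <;> ring

-- A's loop from the initial state computes: index1 = last index of in1 (else 0), and
-- index2 = last index of in2 (else 0) — except that when in1 = in2 the elif never fires,
-- so index2 stays 0.
theorem loopA_eq (in1 in2 : String) (xs : List String) :
    loopA in1 in2 xs 0 (0, 0)
      = (revGo in1 xs.reverse ((xs.length : Int) - 1),
         if in1 = in2 then 0 else revGo in2 xs.reverse ((xs.length : Int) - 1)) := by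
  induction xs using List.reverseRecOn with
  | nil => simp [loopA, revGo]
  | append_singleton xs y ih =>
      rw [loopA_append]
      simp only [ih, List.reverse_append, List.reverse_cons, List.reverse_nil,
        List.nil_append, List.cons_append, List.length_append, List.length_cons,
        List.length_nil, loopA, revGo]
      push_cast
      by_cases h1 : y = in1 <;> by_cases h2 : y = in2 <;> by_cases h12 : in1 = in2 <;>
        simp_all

-- ===== VERDICT (by name: the statement is the Claim_ definition above) =====
theorem indexChecker_spec : Claim_equal_indexChecker := by
  intro in1 in2 sortedProps _
  unfold Spec_indexChecker indexChecker indexChecker_alt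
  by_cases hg : in1 ≠ "" ∧ in2 ∈ sortedProps
  · simp only [hg, loopA_eq]
    by_cases h12 : in1 = in2
    · -- in1 = in2: A has index2 = 0 (always False branch); B has index2 = index1,
      -- so either index1 = 0 (False) or index1 > index1 fails (False): same value.
      subst h12
      by_cases hz : revGo in1 sortedProps.reverse ((sortedProps.length : Int) - 1) = 0 <;>
        simp [hz]
    · simp [h12]
  · simp [hg]
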